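-- pv_equiv track=rewrite | github.com/WillItMod/umbrel-dev-community-store | willitmod-dev-bch/data/ui/app.py | _cashaddr_polymod
-- ===== SOURCE A (Python) =====
-- _CASHADDR_POLYMOD_GEN = (
--     0x98F2BC8E61,
--     0x79B76D99E2,
--     0xF33E5FB3C4,
--     0xAE2EABE2A8,
--     0x1E4F43E470,
-- )
--
-- def _cashaddr_polymod(values: list[int]) -> int:
--     chk = 1
--     for v in values:
--         top = chk >> 35
--         chk = ((chk & 0x07FFFFFFFF) << 5) ^ v
--         for i in range(5):
--             if (top >> i) & 1:
--                 chk ^= _CASHADDR_POLYMOD_GEN[i]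
--     return chk
-- ===== SOURCE B (Python) =====
-- _CASHADDR_POLYMOD_GEN = (
--     0x98F2BC8E61,
--     0x79B76D99E2,
--     0xF33E5FB3C4,
--     0xAE2EABE2A8,
--     0x1E4F43E470,
-- )
--
-- # Precomputed: _POLY_TABLE[t] is the XOR of _CASHADDR_POLYMOD_GEN[i] over the set
-- # bits i of t (t = 0..31), so one table lookup replaces the 5-iteration bit loop.
-- _POLY_TABLE = (
--     0x0000000000, 0x98F2BC8E61, 0x79B76D99E2, 0xE145D11783,
--     0xF33E5FB3C4, 0x6BCCE33DA5, 0x8A89322A26, 0x127B8EA447,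
--     0xAE2EABE2A8, 0x36DC176CC9, 0xD799C67B4A, 0x4F6B7AF52B,
--     0x5D10F4516C, 0xC5E248DF0D, 0x24A799C88E, 0xBC552546EF,
--     0x1E4F43E470, 0x86BDFF6A11, 0x67F82E7D92, 0xFF0A92F3F3,
--     0xED711C57B4, 0x7583A0D9D5, 0x94C671CE56, 0x0C34CD4037,
--     0xB061E806D8, 0x28935488B9, 0xC9D6859F3A, 0x512439115B,
--     0x435FB7B51C, 0xDBAD0B3B7D, 0x3AE8DA2CFE, 0xA21A66A29F,
-- )
--
-- def _cashaddr_polymod(values: list[int]) -> int: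
--     chk = 1
--     for v in values:
--         top = chk >> 35
--         chk = ((chk & 0x07FFFFFFFF) << 5) ^ v
--         chk ^= _POLY_TABLE[top & 0x1F]
--     return chk
-- ===== Notes on version B (the rewrite author's own statement) =====
-- stated objective: faster
-- what changed: replaces the inner 5-iteration bit-test loop over the generator constants with a single lookup into a precomputed 32-entry table indexed by the top 5 bits
import Mathlib
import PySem

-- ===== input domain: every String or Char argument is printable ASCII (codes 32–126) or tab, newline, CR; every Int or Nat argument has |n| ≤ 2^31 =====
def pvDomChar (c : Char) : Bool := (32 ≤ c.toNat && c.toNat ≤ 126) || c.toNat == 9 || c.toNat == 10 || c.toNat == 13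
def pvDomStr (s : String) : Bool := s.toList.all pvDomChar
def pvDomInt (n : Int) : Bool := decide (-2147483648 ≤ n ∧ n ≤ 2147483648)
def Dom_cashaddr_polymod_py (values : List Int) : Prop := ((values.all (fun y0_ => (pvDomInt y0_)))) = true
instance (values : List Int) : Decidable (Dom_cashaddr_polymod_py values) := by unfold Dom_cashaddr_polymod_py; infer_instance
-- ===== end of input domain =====

-- ===== PORT A =====
-- B replaces the inner 5-iteration bit-test loop by one lookup in a precomputed 32-entry table (objective: faster).
def pvCashaddrGen : List Int :=
  [0x98F2BC8E61, 0x79B76D99E2, 0xF33E5FB3C4, 0xAE2EABE2A8, 0x1E4F43E470]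

def cashaddr_polymod_py (values : List Int) : Int :=
  values.foldl (fun chk v =>
    let top := chk >>> (35 : Nat)
    let chk1 := PySem.Int.bxor (PySem.Int.band chk 0x07FFFFFFFF <<< (5 : Nat)) v
    (PySem.List.pyRange 0 5 1).foldl
      (fun c i => if PySem.Int.band (top >>> i.toNat) 1 ≠ 0
                  then PySem.Int.bxor c (PySem.List.pyGetD pvCashaddrGen i 0) else c) chk1) 1

-- ===== PORT B =====
def pvPolyTable : List Int :=
  [0x0000000000, 0x98F2BC8E61, 0x79B76D99E2, 0xE145D11783,
   0xF33E5FB3C4, 0x6BCCE33DA5, 0x8A89322A26, 0x127B8EA447,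
   0xAE2EABE2A8, 0x36DC176CC9, 0xD799C67B4A, 0x4F6B7AF52B,
   0x5D10F4516C, 0xC5E248DF0D, 0x24A799C88E, 0xBC552546EF,
   0x1E4F43E470, 0x86BDFF6A11, 0x67F82E7D92, 0xFF0A92F3F3,
   0xED711C57B4, 0x7583A0D9D5, 0x94C671CE56, 0x0C34CD4037,
   0xB061E806D8, 0x28935488B9, 0xC9D6859F3A, 0x512439115B,
   0x435FB7B51C, 0xDBAD0B3B7D, 0x3AE8DA2CFE, 0xA21A66A29F]

def cashaddr_polymod_py_alt (values : List Int) : Int :=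
  values.foldl (fun chk v =>
    let top := chk >>> (35 : Nat)
    let chk1 := PySem.Int.bxor (PySem.Int.band chk 0x07FFFFFFFF <<< (5 : Nat)) v
    PySem.Int.bxor chk1 (PySem.List.pyGetD pvPolyTable (PySem.Int.band top 31) 0)) 1

-- ===== PRECONDITION & SPEC =====
def Spec_cashaddr_polymod_py (values : List Int) (out : Int) : Prop := out = cashaddr_polymod_py_alt values
instance (values : List Int) (out : Int) : Decidable (Spec_cashaddr_polymod_py values out) := by unfold Spec_cashaddr_polymod_py; infer_instance

-- ===== CLAIM (what is proved, stated in full; the proofs are below) =====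
def Claim_equal_cashaddr_polymod_py : Prop := ∀ (values : List Int), Dom_cashaddr_polymod_py values → Spec_cashaddr_polymod_py values (cashaddr_polymod_py values)

-- ===== LEMMAS AND PROOFS =====

theorem pvBxor_ofNat_ofNat (m n : Nat) :
    PySem.Int.bxor (Int.ofNat m) (Int.ofNat n) = Int.ofNat (m ^^^ n) := by
  simp [PySem.Int.bxor]

theorem pvBxor_ofNat_negSucc (m n : Nat) :
    PySem.Int.bxor (Int.ofNat m) (Int.negSucc n) = Int.negSucc (m ^^^ n) := by
  simp [PySem.Int.bxor, Int.negSucc_eq]; omega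

theorem pvBxor_negSucc_ofNat (m n : Nat) :
    PySem.Int.bxor (Int.negSucc m) (Int.ofNat n) = Int.negSucc (m ^^^ n) := by
  simp [PySem.Int.bxor, Int.negSucc_eq]; omega

theorem pvBxor_negSucc_negSucc (m n : Nat) :
    PySem.Int.bxor (Int.negSucc m) (Int.negSucc n) = Int.ofNat (m ^^^ n) := by
  simp [PySem.Int.bxor]

theorem pvBxor_assoc (a b c : Int) :
    PySem.Int.bxor (PySem.Int.bxor a b) c = PySem.Int.bxor a (PySem.Int.bxor b c) := by
  cases a <;> cases b <;> cases c <;>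
    simp only [pvBxor_ofNat_ofNat, pvBxor_ofNat_negSucc, pvBxor_negSucc_ofNat,
      pvBxor_negSucc_negSucc, Nat.xor_assoc]

theorem pvBand31_eq_emod (t : Int) : PySem.Int.band t 31 = t % 32 := by
  cases t with
  | ofNat m =>
      simp only [PySem.Int.band]
      norm_num
      have h : m &&& Int.toNat 31 = m % 32 := by
        rw [show Int.toNat 31 = 2 ^ 5 - 1 from rfl]
        exact Nat.and_two_pow_sub_one_eq_mod m 5
      omega
  | negSucc m =>
      simp only [PySem.Int.band]
      norm_num
      have h : Int.toNat 31 &&& m = m % 32 := by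
        rw [show Int.toNat 31 = 2 ^ 5 - 1 from rfl, Nat.and_comm]
        exact Nat.and_two_pow_sub_one_eq_mod m 5
      omega

theorem pvRange5 : PySem.List.pyRange 0 5 1 = [0, 1, 2, 3, 4] := by decide

theorem pvInner_eq (t c : Int) :
    (PySem.List.pyRange 0 5 1).foldl
      (fun x i => if PySem.Int.band (t >>> i.toNat) 1 ≠ 0
                  then PySem.Int.bxor x (PySem.List.pyGetD pvCashaddrGen i 0) else x) c
      = PySem.Int.bxor c (PySem.List.pyGetD pvPolyTable (PySem.Int.band t 31) 0) := by
  have hbit : ∀ i : Nat, PySem.Int.band (t >>> ((i : Nat) : Int)) 1 = t / 2 ^ i % 2 := by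
    intro i
    rw [Int.shiftRight_natCast_right, PySem.Int.band_one, Int.shiftRight_eq_div_pow,
      PySem.Int.mod_eq_emod_of_pos (by norm_num)]
    norm_cast
  obtain ⟨n, hn, ht⟩ : ∃ n : Nat, n < 32 ∧ t % 32 = (n : Int) :=
    ⟨(t % 32).toNat, by omega, by omega⟩
  rw [pvBand31_eq_emod, ht]
  have h0 : PySem.Int.band (t >>> ((0 : Nat) : Int)) 1 = ((n % 2 : Nat) : Int) := by
    rw [hbit]; norm_num; omega
  have h1 : PySem.Int.band (t >>> ((1 : Nat) : Int)) 1 = ((n / 2 % 2 : Nat) : Int) := by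
    rw [hbit]; norm_num; omega
  have h2 : PySem.Int.band (t >>> ((2 : Nat) : Int)) 1 = ((n / 4 % 2 : Nat) : Int) := by
    rw [hbit]; norm_num; omega
  have h3 : PySem.Int.band (t >>> ((3 : Nat) : Int)) 1 = ((n / 8 % 2 : Nat) : Int) := by
    rw [hbit]; norm_num; omega
  have h4 : PySem.Int.band (t >>> ((4 : Nat) : Int)) 1 = ((n / 16 % 2 : Nat) : Int) := by
    rw [hbit]; norm_num; omega
  rw [pvRange5]
  simp only [List.foldl]
  rw [show Int.toNat (0 : Int) = 0 from rfl, show Int.toNat (1 : Int) = 1 from rfl,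
    show Int.toNat (2 : Int) = 2 from rfl, show Int.toNat (3 : Int) = 3 from rfl,
    show Int.toNat (4 : Int) = 4 from rfl]
  rw [h0, h1, h2, h3, h4]
  interval_cases n <;>
    norm_num <;>
    (try simp only [pvBxor_assoc]) <;>
    first
      | rfl
      | (congr 1 <;> first | rfl | decide)
      | (refine (PySem.Int.bxor_zero c).symm.trans ?_ ; congr 1 <;> first | rfl | decide)

theorem cashaddr_polymod_py_eq_alt (values : List Int) :
    cashaddr_polymod_py values = cashaddr_polymod_py_alt values := by
  unfold cashaddr_polymod_py cashaddr_polymod_py_alt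
  congr 1
  funext chk v
  exact pvInner_eq (chk >>> (35 : Nat)) _

-- ===== VERDICT (by name: the statement is the Claim_ definition above) =====
theorem cashaddr_polymod_py_spec : Claim_equal_cashaddr_polymod_py := by
  intro values _
  unfold Spec_cashaddr_polymod_py
  exact cashaddr_polymod_py_eq_alt values
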